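-- pv_equiv track=rewrite | github.com/google/pigweed | pw_watch/py/pw_watch/run.py | _parse_commands
-- ===== SOURCE A (Python) =====
-- from typing import Iterable, Sequence
--
-- _CMD_DELIMITER = ','
--
-- def _parse_commands(
--     prefix: Sequence[str], raw_commands: Sequence[str]
-- ) -> Iterable[tuple[str, ...]]:
--     start = 0
--     while start < len(raw_commands):
--         try:
--             end = raw_commands.index(_CMD_DELIMITER, start)
--         except ValueError:
--             end = len(raw_commands)
--
--         yield (*prefix, *raw_commands[start:end])
--         start = end + 1
-- ===== SOURCE B (Python) =====
-- _CMD_DELIMITER = ','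
--
-- def _parse_commands(prefix, raw_commands):
--     current = []
--     for item in raw_commands:
--         if item == _CMD_DELIMITER:
--             yield (*prefix, *current)
--             current = []
--         else:
--             current.append(item)
--     if current:
--         yield (*prefix, *current)
-- ===== Notes on version B (the rewrite author's own statement) =====
-- stated objective: alternative
-- what changed: Replaced the index-arithmetic while loop with repeated list.index scans and slicing by a single streaming pass that accumulates the current segment in a buffer and flushes it at each delimiter (and at the end if non-empty).
import Mathlib
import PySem

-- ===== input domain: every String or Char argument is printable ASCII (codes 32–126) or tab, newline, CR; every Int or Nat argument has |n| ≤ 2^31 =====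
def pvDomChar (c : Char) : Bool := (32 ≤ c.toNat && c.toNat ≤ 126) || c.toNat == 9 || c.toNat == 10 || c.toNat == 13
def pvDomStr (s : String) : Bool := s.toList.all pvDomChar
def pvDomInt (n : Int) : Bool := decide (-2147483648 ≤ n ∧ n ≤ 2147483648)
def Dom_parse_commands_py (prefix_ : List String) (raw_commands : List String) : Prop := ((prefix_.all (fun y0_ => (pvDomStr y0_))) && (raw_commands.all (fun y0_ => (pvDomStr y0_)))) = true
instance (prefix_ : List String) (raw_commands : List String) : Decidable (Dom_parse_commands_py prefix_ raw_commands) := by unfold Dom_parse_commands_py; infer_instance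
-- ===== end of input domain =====

-- B replaces A's index-arithmetic loop (repeated list.index + slicing) by a single
-- streaming pass with a segment buffer flushed at each delimiter; objective: alternative
-- decomposition of the same O(n) task. Equivalence of the returned list is proved on all inputs.

-- ===== PORT A =====
-- hand port of `raw_commands.index(',', start)` with the ValueError caught and turned
-- into len(raw_commands): exact for 0 ≤ start (the only values A's loop produces).
def pvAidx (raw : List String) (start : Nat) : Nat :=
  match (raw.drop start).findIdx? (· == ",") with
  | some i => start + i
  | none => raw.length

theorem pvAidx_ge (raw : List String) (start : Nat) (h : start ≤ raw.length) :
    start ≤ pvAidx raw start := by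
  unfold pvAidx
  cases hf : (raw.drop start).findIdx? (· == ",") with
  | some i => simp only; omega
  | none => simp only; omega

-- A's while loop over the index `start`; `(raw.drop start).take (e - start)` is
-- raw_commands[start:e] for 0 ≤ start ≤ e (the only slices A takes).
def pvAloop (prefix_ : List String) (raw : List String) (start : Nat) : List (List String) :=
  if h : start < raw.length then
    let e := pvAidx raw start
    (prefix_ ++ (raw.drop start).take (e - start)) :: pvAloop prefix_ raw (e + 1)
  else []
termination_by raw.length - start
decreasing_by
  have := pvAidx_ge raw start (Nat.le_of_lt h)
  omega

def parse_commands_py (prefix_ : List String) (raw_commands : List String) : List (List String) :=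
  pvAloop prefix_ raw_commands 0

-- ===== PORT B =====
-- B's for loop: `cur` is the buffer `current`; flush at each delimiter, and at the
-- end only if non-empty.
def pvBloop (prefix_ : List String) (cur : List String) : List String → List (List String)
  | [] => if cur.isEmpty then [] else [prefix_ ++ cur]
  | x :: xs =>
      if x == "," then (prefix_ ++ cur) :: pvBloop prefix_ [] xs
      else pvBloop prefix_ (cur ++ [x]) xs

def parse_commands_py_alt (prefix_ : List String) (raw_commands : List String) : List (List String) :=
  pvBloop prefix_ [] raw_commands

-- ===== PRECONDITION & SPEC =====
def Spec_parse_commands_py (prefix_ : List String) (raw_commands : List String) (out : List (List String)) : Prop := out = parse_commands_py_alt prefix_ raw_commands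
instance (prefix_ : List String) (raw_commands : List String) (out : List (List String)) : Decidable (Spec_parse_commands_py prefix_ raw_commands out) := by unfold Spec_parse_commands_py; infer_instance

-- ===== CLAIM (what is proved, stated in full; the proofs are below) =====
def Claim_equal_parse_commands_py : Prop := ∀ (prefix_ : List String) (raw_commands : List String), Dom_parse_commands_py prefix_ raw_commands → Spec_parse_commands_py prefix_ raw_commands (parse_commands_py prefix_ raw_commands)

-- ===== LEMMAS AND PROOFS =====

theorem pvAidx_delim (raw : List String) (start : Nat) (h : start < raw.length)
    (hx : raw[start] = ",") : pvAidx raw start = start := by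
  unfold pvAidx
  rw [List.drop_eq_getElem_cons h, List.findIdx?_cons]
  simp [hx]

theorem pvAidx_succ (raw : List String) (start : Nat) (h : start < raw.length)
    (hx : raw[start] ≠ ",") : pvAidx raw start = pvAidx raw (start + 1) := by
  unfold pvAidx
  rw [List.drop_eq_getElem_cons h, List.findIdx?_cons]
  have : (raw[start] == ",") = false := by simp [hx]
  rw [this]
  cases hf : (raw.drop (start + 1)).findIdx? (· == ",") with
  | some i => simp [Option.map]; omega
  | none => simp

-- the main invariant relating B's buffer state to A's index loop
theorem pvK : ∀ (n : Nat) (prefix_ raw : List String) (start : Nat) (cur : List String),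
    raw.length - start = n →
    pvBloop prefix_ cur (raw.drop start) =
      if start < raw.length ∨ cur ≠ [] then
        (prefix_ ++ cur ++ ((raw.drop start).take (pvAidx raw start - start)))
          :: pvAloop prefix_ raw (pvAidx raw start + 1)
      else [] := by
  intro n
  induction n with
  | zero =>
      intro prefix_ raw start cur h
      have hle : raw.length ≤ start := by omega
      have hdrop : raw.drop start = [] := List.drop_eq_nil_of_le hle
      have hidx : pvAidx raw start = raw.length := by
        unfold pvAidx; rw [hdrop]; simp
      rw [hdrop, hidx]
      have htail : pvAloop prefix_ raw (raw.length + 1) = [] := by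
        rw [pvAloop]; simp
      cases cur with
      | nil => simp [pvBloop, Nat.not_lt_of_le hle]
      | cons c cs => simp [pvBloop, Nat.not_lt_of_le hle, htail]
  | succ n ih =>
      intro prefix_ raw start cur h
      have hlt : start < raw.length := by omega
      have hdrop := List.drop_eq_getElem_cons hlt
      by_cases hx : raw[start] = ","
      · -- delimiter at the head: B flushes, A's end = start
        have hidx := pvAidx_delim raw start hlt hx
        rw [hdrop, hx]
        have hB : pvBloop prefix_ cur ("," :: raw.drop (start + 1)) =
            (prefix_ ++ cur) :: pvBloop prefix_ [] (raw.drop (start + 1)) := by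
          simp [pvBloop]
        rw [hB, ih prefix_ raw (start + 1) [] (by omega)]
        have hA : pvAloop prefix_ raw (start + 1) =
            if start + 1 < raw.length ∨ ([] : List String) ≠ [] then
              (prefix_ ++ [] ++ ((raw.drop (start + 1)).take (pvAidx raw (start + 1) - (start + 1))))
                :: pvAloop prefix_ raw (pvAidx raw (start + 1) + 1)
            else [] := by
          rw [pvAloop]
          by_cases h1 : start + 1 < raw.length <;> simp [h1]
        rw [← hA, hidx]
        simp [hlt]
      · -- ordinary item: B buffers it, A's end is unchanged
        have hidx := pvAidx_succ raw start hlt hx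
        have hge : start + 1 ≤ pvAidx raw (start + 1) :=
          pvAidx_ge raw (start + 1) (by omega)
        rw [hdrop]
        have hB : pvBloop prefix_ cur (raw[start] :: raw.drop (start + 1)) =
            pvBloop prefix_ (cur ++ [raw[start]]) (raw.drop (start + 1)) := by
          simp [pvBloop, hx]
        rw [hB, ih prefix_ raw (start + 1) (cur ++ [raw[start]]) (by omega)]
        have hcond : (start + 1 < raw.length ∨ (cur ++ [raw[start]]) ≠ []) := Or.inr (by simp)
        rw [if_pos hcond, if_pos (Or.inl hlt), hidx]
        have htake : (raw.drop start).take (pvAidx raw (start + 1) - start) =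
            raw[start] :: (raw.drop (start + 1)).take (pvAidx raw (start + 1) - (start + 1)) := by
          rw [hdrop]
          have : pvAidx raw (start + 1) - start = (pvAidx raw (start + 1) - (start + 1)) + 1 := by
            omega
          rw [this, List.take_succ_cons]
        rw [← hdrop, htake]
        simp

-- ===== VERDICT (by name: the statement is the Claim_ definition above) =====
theorem parse_commands_py_spec : Claim_equal_parse_commands_py := by
  intro prefix_ raw _
  unfold Spec_parse_commands_py parse_commands_py parse_commands_py_alt
  have hK := pvK raw.length prefix_ raw 0 [] (by omega)
  simp only [List.drop_zero] at hK
  rw [hK, pvAloop]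
  by_cases h0 : 0 < raw.length <;> simp [h0]
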